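-- pv_equiv track=rewrite | github.com/mageshyt/leetcode-solutions | backtracking/travel.py | travelerCityCount
-- ===== SOURCE A (Python) =====
-- def travelerCityCount(n, k):
--     res = 0
--     dp = {}  # (start, visited) -> count
--
--     def backtrack(start, visited):
--         if start > k:
--             return 0
--         if visited == n:
--             return 1
--
--         if (start, visited) in dp:
--             return dp[(start, visited)]
--         take = 0
--         # take
--         for i in range(start*2, k+1):
--             take += backtrack(i, visited+1)
--
--         dp[(start, visited)] = take
--
--         return dp[(start, visited)]
--
--     return backtrack(1, 1)
-- ===== SOURCE B (Python) =====
-- def travelerCityCount(n, k):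
--     # Bottom-up DP over visited-levels with a suffix-sum array, replacing the
--     # memoized backtracking's inner summation loop.
--     if k < 1:
--         return 0
--     if n == 1:
--         return 1
--     if n < 1 or n - 1 >= k.bit_length():
--         # fewer than n cities fit: each step at least doubles, 2**(n-1) > k
--         return 0
--     K = k
--     cur = [1] * K  # cur[s-1] = number of ways continuing from start s at the current level
--     for _ in range(n - 1):
--         suf = [0] * (K + 1)  # suf[j] = cur[j] + ... + cur[K-1]
--         for j in range(K - 1, -1, -1):
--             suf[j] = suf[j + 1] + cur[j]
--         cur = [suf[2 * s - 1] if 2 * s - 1 <= K else 0 for s in range(1, K + 1)]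
--     return cur[0]
-- ===== Notes on version B (the rewrite author's own statement) =====
-- stated objective: faster
-- what changed: Replaced the top-down memoized backtracking (whose inner loop re-sums O(k) recursive results per state) by a bottom-up per-level DP that builds one suffix-sum array per level, plus a closed-form bit_length guard that returns 0 when 2^(n-1) > k.
import Mathlib
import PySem

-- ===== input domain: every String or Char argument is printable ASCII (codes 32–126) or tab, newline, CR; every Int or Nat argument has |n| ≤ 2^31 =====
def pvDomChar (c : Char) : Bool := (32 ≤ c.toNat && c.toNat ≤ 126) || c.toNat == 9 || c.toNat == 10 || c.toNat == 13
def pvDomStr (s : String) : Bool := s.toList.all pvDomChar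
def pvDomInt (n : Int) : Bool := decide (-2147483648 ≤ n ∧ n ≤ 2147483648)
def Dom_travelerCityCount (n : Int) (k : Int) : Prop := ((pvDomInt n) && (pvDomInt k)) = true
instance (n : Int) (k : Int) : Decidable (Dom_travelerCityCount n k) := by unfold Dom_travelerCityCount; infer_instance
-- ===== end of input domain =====

-- B replaces A's memoized backtracking by a bottom-up per-level DP with a suffix-sum
-- array (asymptotically fewer additions per level).

-- ===== PORT A =====
-- `backtrack` with its memo dict; `fuel` only makes the recursion structural — the fuel
-- used below is large enough that it is never exhausted (start strictly increases toward k).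
def btA (n k : Int) : Nat → Int → Int → PySem.Dict (Int × Int) Int → Int × PySem.Dict (Int × Int) Int
  | 0, _, _, dp => (0, dp)   -- unreachable for the fuel travelerCityCount passes
  | fuel+1, start, visited, dp =>
    if start > k then (0, dp)
    else if visited = n then (1, dp)
    else
      match dp.get? (start, visited) with
      | some c => (c, dp)
      | none =>
        let r := (PySem.List.pyRange (start*2) (k+1) 1).foldl
          (fun acc i =>
            let p := btA n k fuel i (visited+1) acc.2
            (acc.1 + p.1, p.2)) (0, dp)
        (r.1, r.2.insert (start, visited) r.1)

def travelerCityCount (n : Int) (k : Int) : Int :=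
  (btA n k ((k+1).toNat + 1) 1 1 PySem.Dict.empty).1

-- ===== PORT B =====
-- suffix-sum array: suf[j] = suf[j+1] + cur[j], built right-to-left as in Source B
def sufB : List Int → List Int
  | [] => [0]
  | x :: xs => ((sufB xs).headI + x) :: sufB xs

-- one level of the DP: cur[s-1] = suf[2s-1] if 2s-1 <= k else 0, for s = 1..k
def stepB (k : Int) (cur : List Int) : List Int :=
  (PySem.List.pyRange 1 (k+1) 1).map
    (fun s => if 2*s - 1 ≤ k then PySem.List.pyGetD (sufB cur) (2*s - 1) 0 else 0)

def travelerCityCount_alt (n : Int) (k : Int) : Int :=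
  if k < 1 then 0
  else if n = 1 then 1
  -- Python's k.bit_length() for k ≥ 1 is exactly Nat.log2 k + 1
  else if n < 1 ∨ n - 1 ≥ (Nat.log2 k.toNat : Int) + 1 then 0
  else PySem.List.pyGetD ((stepB k)^[(n-1).toNat] (List.replicate k.toNat 1)) 0 0

-- ===== PRECONDITION & SPEC =====
def Spec_travelerCityCount (n : Int) (k : Int) (out : Int) : Prop := out = travelerCityCount_alt n k
instance (n : Int) (k : Int) (out : Int) : Decidable (Spec_travelerCityCount n k out) := by unfold Spec_travelerCityCount; infer_instance

-- ===== CLAIM (what is proved, stated in full; the proofs are below) =====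
def Claim_equal_travelerCityCount : Prop := ∀ (n : Int) (k : Int), Dom_travelerCityCount n k → Spec_travelerCityCount n k (travelerCityCount n k)

-- ===== LEMMAS AND PROOFS =====

-- the pure (memo-free, fuelled) value of A's backtrack
def specP (n k : Int) : Nat → Int → Int → Int
  | 0, _, _ => 0
  | f+1, s, v =>
    if s > k then 0
    else if v = n then 1
    else ((PySem.List.pyRange (s*2) (k+1) 1).map (fun i => specP n k f i (v+1))).sum

-- the fuel-independent value (fuel (k+1).toNat + 1 suffices for any start ≥ 1)
def V (n k s v : Int) : Int := specP n k ((k+1).toNat + 1) s v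

lemma specP_stab (n k : Int) : ∀ (f : Nat) (s v : Int), 1 ≤ s → (k+1-s).toNat ≤ f →
    specP n k (f+1) s v = specP n k f s v := by
  intro f
  induction f with
  | zero =>
    intro s v hs hb
    have h1 : s > k := by omega
    simp [specP, h1]
  | succ f IH =>
    intro s v hs hb
    by_cases h1 : s > k
    · simp [specP, h1]
    by_cases h2 : v = n
    · simp [specP, h1, h2]
    simp only [specP, if_neg h1, if_neg h2]
    congr 1
    apply List.map_congr_left
    intro i hi
    obtain ⟨hi1, hi2⟩ := PySem.List.mem_pyRange_one.1 hi
    exact IH i (v+1) (by omega) (by omega)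

lemma specP_eq_bound (n k : Int) : ∀ (f : Nat) (s v : Int), 1 ≤ s → (k+1-s).toNat ≤ f →
    specP n k f s v = specP n k (k+1-s).toNat s v := by
  intro f
  induction f with
  | zero =>
    intro s v hs hb
    have h : (k+1-s).toNat = 0 := by omega
    rw [h]
  | succ f IH =>
    intro s v hs hb
    by_cases h : (k+1-s).toNat ≤ f
    · rw [specP_stab n k f s v hs h, IH s v hs h]
    · have h2 : (k+1-s).toNat = f + 1 := by omega
      rw [h2]

lemma specP_congr (n k : Int) (f g : Nat) (s v : Int) (hs : 1 ≤ s)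
    (hf : (k+1-s).toNat ≤ f) (hg : (k+1-s).toNat ≤ g) :
    specP n k f s v = specP n k g s v := by
  rw [specP_eq_bound n k f s v hs hf, specP_eq_bound n k g s v hs hg]

lemma V_eq (n k s v : Int) (hs : 1 ≤ s) :
    V n k s v = if s > k then 0 else if v = n then 1
      else ((PySem.List.pyRange (s*2) (k+1) 1).map (fun i => V n k i (v+1))).sum := by
  unfold V
  conv_lhs => rw [show (k+1).toNat + 1 = ((k+1).toNat) + 1 from rfl]
  simp only [specP]
  by_cases h1 : s > k
  · simp [h1]
  by_cases h2 : v = n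
  · simp [h1, h2]
  simp only [if_neg h1, if_neg h2]
  congr 1
  apply List.map_congr_left
  intro i hi
  obtain ⟨hi1, hi2⟩ := PySem.List.mem_pyRange_one.1 hi
  exact specP_congr n k ((k+1).toNat) ((k+1).toNat + 1) i (v+1) (by omega) (by omega) (by omega)

-- memo-dict invariant: every stored entry is the pure value
def MemoInv (n k : Int) (dp : PySem.Dict (Int × Int) Int) : Prop :=
  ∀ p c, dp.get? p = some c → 1 ≤ p.1 ∧ c = V n k p.1 p.2

lemma btA_correct (n k : Int) : ∀ (fuel : Nat) (s v : Int) (dp : PySem.Dict (Int × Int) Int),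
    1 ≤ s → (k+1-s).toNat < fuel → MemoInv n k dp →
    (btA n k fuel s v dp).1 = V n k s v ∧ MemoInv n k (btA n k fuel s v dp).2 := by
  intro fuel
  induction fuel with
  | zero => intro s v dp hs hf _; exact absurd hf (Nat.not_lt_zero _)
  | succ f IH =>
    intro s v dp hs hf hinv
    by_cases h1 : s > k
    · simp only [btA, if_pos h1]
      exact ⟨by rw [V_eq n k s v hs, if_pos h1], hinv⟩
    by_cases h2 : v = n
    · simp only [btA, if_neg h1, if_pos h2]
      exact ⟨by rw [V_eq n k s v hs, if_neg h1, if_pos h2], hinv⟩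
    have hsk : s ≤ k := by omega
    rcases hget : dp.get? (s, v) with _ | c
    · -- none: compute the fold
      have fold : ∀ (l : List Int), (∀ i ∈ l, s*2 ≤ i) → ∀ (a : Int) (d : PySem.Dict (Int × Int) Int),
          MemoInv n k d →
          (l.foldl (fun acc i =>
            let p := btA n k f i (v+1) acc.2
            (acc.1 + p.1, p.2)) (a, d)).1 = a + (l.map (fun i => V n k i (v+1))).sum ∧
          MemoInv n k (l.foldl (fun acc i =>
            let p := btA n k f i (v+1) acc.2
            (acc.1 + p.1, p.2)) (a, d)).2 := by
        intro l
        induction l with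
        | nil => intro _ a d hd; exact ⟨by simp, hd⟩
        | cons i t iht =>
          intro hmem a d hd
          have hi : s*2 ≤ i := hmem i (by simp)
          have hrec := IH i (v+1) d (by omega) (by omega) hd
          simp only [List.foldl_cons]
          have := iht (fun j hj => hmem j (by simp [hj])) (a + (btA n k f i (v+1) d).1)
            (btA n k f i (v+1) d).2 hrec.2
          refine ⟨?_, this.2⟩
          rw [this.1, hrec.1, List.map_cons, List.sum_cons]
          ring
      simp only [btA, if_neg h1, if_neg h2, hget]
      have hr := fold (PySem.List.pyRange (s*2) (k+1) 1)
        (fun i hi => (PySem.List.mem_pyRange_one.1 hi).1) 0 dp hinv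
      have hval : (((PySem.List.pyRange (s*2) (k+1) 1).foldl (fun acc i =>
            let p := btA n k f i (v+1) acc.2
            (acc.1 + p.1, p.2)) (0, dp)).1) = V n k s v := by
        rw [hr.1, V_eq n k s v hs, if_neg h1, if_neg h2]; ring
      refine ⟨hval, ?_⟩
      intro p c hp
      rw [PySem.Dict.get?_insert] at hp
      by_cases hps : p = (s, v)
      · rw [if_pos hps] at hp
        cases hp
        exact ⟨by rw [hps]; exact hs, by rw [hps, hval.symm]⟩
      · rw [if_neg hps] at hp
        exact hr.2 p c hp
    · -- memo hit
      simp only [btA, if_neg h1, if_neg h2, hget]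
      exact ⟨(hinv (s, v) c hget).2, hinv⟩

lemma A_eq_V (n k : Int) : travelerCityCount n k = V n k 1 1 := by
  unfold travelerCityCount
  have hinv : MemoInv n k PySem.Dict.empty := by
    intro p c hp
    rw [PySem.Dict.get?_empty] at hp
    cases hp
  exact (btA_correct n k ((k+1).toNat + 1) 1 1 PySem.Dict.empty le_rfl (by omega) hinv).1

-- ===== vanishing lemmas for B's guard branches =====

lemma specP_zero_gt (n k : Int) : ∀ (f : Nat) (s v : Int), n < v → specP n k f s v = 0 := by
  intro f
  induction f with
  | zero => intro s v _; simp [specP]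
  | succ f IH =>
    intro s v hv
    simp only [specP]
    by_cases h1 : s > k
    · simp [h1]
    have h2 : ¬ (v = n) := by omega
    simp only [if_neg h1, if_neg h2]
    apply List.sum_eq_zero
    intro x hx
    obtain ⟨i, hi, rfl⟩ := List.mem_map.1 hx
    exact IH i (v+1) (by omega)

lemma specP_zero_pow (n k : Int) : ∀ (f : Nat) (s v : Int), 1 ≤ s → v < n →
    k < 2^((n-v).toNat) * s → specP n k f s v = 0 := by
  intro f
  induction f with
  | zero => intro s v _ _ _; simp [specP]
  | succ f IH =>
    intro s v hs hv hpow
    simp only [specP]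
    by_cases h1 : s > k
    · simp [h1]
    have h2 : ¬ (v = n) := by omega
    simp only [if_neg h1, if_neg h2]
    by_cases hr : n - v = 1
    · -- last level before n: the range is empty since 2*s > k
      have he : (n - v).toNat = 1 := by omega
      rw [he, pow_one] at hpow
      rw [PySem.List.pyRange_one_eq_nil (by omega)]
      simp
    · -- at least two levels left
      apply List.sum_eq_zero
      intro x hx
      obtain ⟨i, hi, rfl⟩ := List.mem_map.1 hx
      obtain ⟨hi1, hi2⟩ := PySem.List.mem_pyRange_one.1 hi
      apply IH i (v+1) (by omega) (by omega)
      have hre : (n - v).toNat = (n - (v+1)).toNat + 1 := by omega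
      rw [hre, pow_succ] at hpow
      have hp : (0:Int) < 2 ^ (n - (v+1)).toNat := by positivity
      nlinarith

-- ===== B equals V in the main branch =====

lemma sufB_ne_nil (xs : List Int) : sufB xs ≠ [] := by
  cases xs <;> simp [sufB]

lemma headI_eq_getD_zero (l : List Int) (h : l ≠ []) : l.headI = l.getD 0 0 := by
  cases l with
  | nil => exact absurd rfl h
  | cons a t => rfl

lemma sufB_getD : ∀ (xs : List Int) (j : Nat), j ≤ xs.length →
    (sufB xs).getD j 0 = (xs.drop j).sum := by
  intro xs
  induction xs with
  | nil =>
    intro j hj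
    simp only [List.length_nil, Nat.le_zero] at hj
    subst hj
    simp [sufB]
  | cons x t IH =>
    intro j hj
    cases j with
    | zero =>
      simp only [sufB, List.getD_cons_zero, List.drop_zero, List.sum_cons]
      rw [headI_eq_getD_zero _ (sufB_ne_nil t), IH 0 (by simp)]
      simp [add_comm]
    | succ j =>
      simp only [sufB, List.getD_cons_succ, List.drop_succ_cons]
      exact IH j (by simpa using hj)

lemma stepB_map (k : Int) (g : Int → Int) :
    stepB k ((PySem.List.pyRange 1 (k+1) 1).map g) =
      (PySem.List.pyRange 1 (k+1) 1).map (fun s => ((PySem.List.pyRange (s*2) (k+1) 1).map g).sum) := by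
  unfold stepB
  apply List.map_congr_left
  intro s hsmem
  obtain ⟨hs1, hs2⟩ := PySem.List.mem_pyRange_one.1 hsmem
  by_cases h2 : 2*s - 1 ≤ k
  · rw [if_pos h2]
    have hj : (2*s - 1) = (((2*s - 1).toNat : Nat) : Int) := by omega
    rw [hj, PySem.List.pyGetD_natCast, sufB_getD]
    · have hsplit : PySem.List.pyRange 1 (k+1) 1 =
          PySem.List.pyRange 1 (s*2) 1 ++ PySem.List.pyRange (s*2) (k+1) 1 :=
        PySem.List.pyRange_one_append 1 (s*2) (k+1) (by omega) (by omega)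
      rw [hsplit, List.map_append]
      have hlen : (2*s - 1).toNat = ((PySem.List.pyRange 1 (s*2) 1).map g).length := by
        simp [PySem.List.length_pyRange_one]
        omega
      rw [hlen, List.drop_left]
    · simp [PySem.List.length_pyRange_one]
      omega
  · rw [if_neg h2]
    rw [PySem.List.pyRange_one_eq_nil (by omega : k + 1 ≤ s*2)]
    simp

lemma iter_eq (n k : Int) : ∀ (t : Nat),
    (stepB k)^[t] (List.replicate k.toNat 1) =
      (PySem.List.pyRange 1 (k+1) 1).map (fun s => V n k s (n - t)) := by
  intro t
  induction t with
  | zero =>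
    simp only [Function.iterate_zero, id_eq, Nat.cast_zero, sub_zero]
    have h1 : ∀ s ∈ PySem.List.pyRange 1 (k+1) 1, V n k s n = (fun _ => (1:Int)) s := by
      intro s hs
      obtain ⟨hs1, hs2⟩ := PySem.List.mem_pyRange_one.1 hs
      rw [V_eq n k s n hs1, if_neg (by omega), if_pos rfl]
    rw [List.map_congr_left h1, List.map_const']
    simp [PySem.List.length_pyRange_one]
  | succ t IH =>
    rw [Function.iterate_succ_apply', IH, stepB_map k]
    apply List.map_congr_left
    intro s hs
    obtain ⟨hs1, hs2⟩ := PySem.List.mem_pyRange_one.1 hs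
    rw [V_eq n k s (n - (t+1 : Nat)) hs1, if_neg (by omega), if_neg (by push_cast; omega)]
    congr 1
    apply List.map_congr_left
    intro i _
    congr 1
    push_cast
    ring

lemma B_main (n k : Int) (hk : 1 ≤ k) (hn : 2 ≤ n) :
    PySem.List.pyGetD ((stepB k)^[(n-1).toNat] (List.replicate k.toNat 1)) 0 0 = V n k 1 1 := by
  rw [iter_eq n k ((n-1).toNat)]
  have hl : n - (((n-1).toNat : Nat) : Int) = 1 := by omega
  rw [hl, PySem.List.pyRange_one_cons (by omega : (1:Int) < k+1), List.map_cons]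
  simp [PySem.List.pyGetD]

-- ===== VERDICT (by name: the statement is the Claim_ definition above) =====
theorem travelerCityCount_spec : Claim_equal_travelerCityCount := by
  intro n k _
  show travelerCityCount n k = travelerCityCount_alt n k
  rw [A_eq_V]
  unfold travelerCityCount_alt
  by_cases hk : k < 1
  · rw [if_pos hk, V_eq n k 1 1 le_rfl, if_pos (by omega)]
  rw [if_neg hk]
  by_cases hn1 : n = 1
  · rw [if_pos hn1, V_eq n k 1 1 le_rfl, if_neg (by omega)]
    simp [hn1]
  rw [if_neg hn1]
  by_cases hg : n < 1 ∨ n - 1 ≥ (Nat.log2 k.toNat : Int) + 1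
  · rw [if_pos hg]
    rcases hg with hg | hg
    · exact specP_zero_gt n k _ 1 1 hg
    · apply specP_zero_pow n k _ 1 1 le_rfl (by omega)
      -- n - 1 ≥ log2 k + 1  ⇒  k < 2^(n-1)
      have h1 : k.toNat < 2 ^ (Nat.log2 k.toNat + 1) := Nat.lt_log2_self
      have h2 : (2:Nat) ^ (Nat.log2 k.toNat + 1) ≤ 2 ^ ((n-1).toNat) :=
        Nat.pow_le_pow_right (by norm_num) (by omega)
      have h3 : k.toNat < 2 ^ ((n-1).toNat) := lt_of_lt_of_le h1 h2
      have h4 : (k:Int) = (k.toNat : Int) := by omega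
      rw [h4, mul_one]
      exact_mod_cast h3
  · rw [if_neg hg]
    have hn2 : 2 ≤ n := by
      by_cases h : n < 1
      · exact absurd (Or.inl h) hg
      · omega
    exact (B_main n k (by omega) hn2).symm
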